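-- pv_equiv track=rewrite | github.com/kohrongying/aoc | 2019/python/day8.py | construct_layers
-- ===== SOURCE A (Python) =====
-- def construct_layers(inp, width, height):
--   size = width * height
--   data = str(inp)
--   layers = []
--   for i in range(0, len(data), size):
--     digits = data[i:i+size]
--     d = {}
--     for digit in digits:
--       if digit in d:
--         d[digit] += 1
--       else:
--         d[digit] = 1
--     layers.append(d)
--   return layers
-- ===== SOURCE B (Python) =====
-- def construct_layers(inp, width, height):
--   size = width * height
--   data = str(inp)
--   if size <= 0:
--     return []
--   layers = []
--   for pos, ch in enumerate(data):
--     li = pos // size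
--     if li == len(layers):
--       layers.append({})
--     d = layers[li]
--     d[ch] = d.get(ch, 0) + 1
--   return layers
-- ===== Notes on version B (the rewrite author's own statement) =====
-- stated objective: alternative
-- what changed: A slices the data into chunks with range(0,len,size) and recounts each chunk in a nested loop; B makes one flat pass over enumerate(data), routing each character to layers[pos // size] and appending a fresh dict when a new layer starts.
import Mathlib
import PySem

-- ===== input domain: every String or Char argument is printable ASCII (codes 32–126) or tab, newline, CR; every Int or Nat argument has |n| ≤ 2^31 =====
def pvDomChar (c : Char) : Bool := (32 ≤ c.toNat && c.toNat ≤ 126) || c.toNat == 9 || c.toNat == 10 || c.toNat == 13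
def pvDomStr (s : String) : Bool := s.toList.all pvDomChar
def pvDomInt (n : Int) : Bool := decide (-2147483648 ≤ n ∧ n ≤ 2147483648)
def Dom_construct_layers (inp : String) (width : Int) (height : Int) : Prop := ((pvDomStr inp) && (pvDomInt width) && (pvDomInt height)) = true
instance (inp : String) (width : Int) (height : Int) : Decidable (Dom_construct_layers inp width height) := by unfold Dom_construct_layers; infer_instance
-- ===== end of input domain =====

-- B replaces A's chunk-slicing nested loops by one flat pass over enumerate(data) that routes each
-- character to its layer via pos // size (objective: alternative decomposition, same cost).

-- ===== PORT A =====
def construct_layers (inp : String) (width : Int) (height : Int) : List (List (String × Int)) :=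
  let size := width * height
  let data := inp.toList
  let layers : List (PySem.Dict String Int) :=
    (PySem.List.pyRange 0 (data.length : Int) size).foldl (fun layers i =>
      let digits := PySem.List.slice data (some i) (some (i + size))
      let d := digits.foldl (fun d digit =>
        if d.contains (String.ofList [digit]) then
          d.insert (String.ofList [digit]) (d.getD (String.ofList [digit]) 0 + 1)
        else
          d.insert (String.ofList [digit]) 1) PySem.Dict.empty
      layers ++ [d]) []
  layers.map PySem.Dict.items

-- ===== PORT B =====
def construct_layers_alt (inp : String) (width : Int) (height : Int) : List (List (String × Int)) :=
  let size := width * height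
  let data := inp.toList
  if size ≤ 0 then []
  else
    let layers : List (PySem.Dict String Int) :=
      (PySem.List.enumerate data 0).foldl (fun layers pc =>
        let li := PySem.Int.floordiv pc.1 size
        let layers := if li = (layers.length : Int) then layers ++ [PySem.Dict.empty] else layers
        -- d = layers[li]; d[ch] = d.get(ch, 0) + 1 : li is always in range when the Python runs
        let d := PySem.List.pyGetD layers li PySem.Dict.empty
        PySem.List.pySetD layers li
          (d.insert (String.ofList [pc.2]) (d.getD (String.ofList [pc.2]) 0 + 1))) []
    layers.map PySem.Dict.items

-- ===== PRECONDITION & SPEC =====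
-- Pre_ excludes only width*height = 0, where Python A raises ValueError (range() with step 0).
def Pre_construct_layers (inp : String) (width : Int) (height : Int) : Prop := width * height ≠ 0
instance (inp : String) (width : Int) (height : Int) : Decidable (Pre_construct_layers inp width height) := by unfold Pre_construct_layers; infer_instance
def pvWitness_construct_layers : String × Int × Int := ("122112012", 3, 1)

def Spec_construct_layers (inp : String) (width : Int) (height : Int) (out : List (List (String × Int))) : Prop := out = construct_layers_alt inp width height
instance (inp : String) (width : Int) (height : Int) (out : List (List (String × Int))) : Decidable (Spec_construct_layers inp width height out) := by unfold Spec_construct_layers; infer_instance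

-- ===== CLAIM (what is proved, stated in full; the proofs are below) =====
def Claim_equal_construct_layers : Prop := ∀ (inp : String) (width : Int) (height : Int), Dom_construct_layers inp width height → Pre_construct_layers inp width height → Spec_construct_layers inp width height (construct_layers inp width height)

-- ===== LEMMAS AND PROOFS =====

-- The common per-character counting step (both inner updates reduce to it).
def stepD (d : PySem.Dict String Int) (c : Char) : PySem.Dict String Int :=
  d.insert (String.ofList [c]) (d.getD (String.ofList [c]) 0 + 1)

-- A's loop as a named function (definitionally the port's loop).
def Acore (s : Int) (cs : List Char) : List (PySem.Dict String Int) :=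
  (PySem.List.pyRange 0 (cs.length : Int) s).foldl (fun layers i =>
    let digits := PySem.List.slice cs (some i) (some (i + s))
    let d := digits.foldl (fun d digit =>
      if d.contains (String.ofList [digit]) then
        d.insert (String.ofList [digit]) (d.getD (String.ofList [digit]) 0 + 1)
      else
        d.insert (String.ofList [digit]) 1) PySem.Dict.empty
    layers ++ [d]) []

-- B's loop body and B's loop from an arbitrary start position (definitionally the port's loop).
def Bstep (s : Int) (layers : List (PySem.Dict String Int)) (pc : Int × Char) : List (PySem.Dict String Int) :=
  let li := PySem.Int.floordiv pc.1 s
  let layers := if li = (layers.length : Int) then layers ++ [PySem.Dict.empty] else layers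
  let d := PySem.List.pyGetD layers li PySem.Dict.empty
  PySem.List.pySetD layers li
    (d.insert (String.ofList [pc.2]) (d.getD (String.ofList [pc.2]) 0 + 1))

def Bfold (s : Int) (cs : List Char) (p : Int) (L : List (PySem.Dict String Int)) : List (PySem.Dict String Int) :=
  (PySem.List.enumerate cs p).foldl (Bstep s) L

theorem construct_layers_eq_Acore (inp : String) (width height : Int) :
    construct_layers inp width height = (Acore (width * height) inp.toList).map PySem.Dict.items := rfl

theorem construct_layers_alt_eq_Bfold (inp : String) (width height : Int) :
    construct_layers_alt inp width height =
      if width * height ≤ 0 then [] else (Bfold (width * height) inp.toList 0 []).map PySem.Dict.items := rfl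

theorem Astep_eq_stepD :
    (fun (d : PySem.Dict String Int) (digit : Char) =>
      if d.contains (String.ofList [digit]) then
        d.insert (String.ofList [digit]) (d.getD (String.ofList [digit]) 0 + 1)
      else
        d.insert (String.ofList [digit]) 1) = stepD := by
  funext d c
  by_cases h : d.contains (String.ofList [c])
  · simp [h, stepD]
  · simp [h, stepD, PySem.Dict.getD_of_not_contains d 0 (by simpa using h)]

theorem Acore_eq_map (s : Int) (cs : List Char) :
    Acore s cs = (PySem.List.pyRange 0 (cs.length : Int) s).map
      (fun i => (PySem.List.slice cs (some i) (some (i + s))).foldl stepD PySem.Dict.empty) := by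
  unfold Acore
  rw [Astep_eq_stepD]
  simpa using PySem.List.foldl_append_singleton_eq_map
    (fun i => (PySem.List.slice cs (some i) (some (i + s))).foldl stepD PySem.Dict.empty)
    (PySem.List.pyRange 0 (cs.length : Int) s) []

theorem floordiv_add_right {s : Int} (hs : 0 < s) (a : Int) :
    PySem.Int.floordiv (a + s) s = PySem.Int.floordiv a s + 1 := by
  have h1 := PySem.Int.floordiv_mul_add_mod a s
  have h2 := PySem.Int.mod_nonneg a hs
  have h3 := PySem.Int.mod_lt a hs
  rw [PySem.Int.floordiv_eq_iff_of_pos hs]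
  constructor <;> nlinarith

theorem pyGetD_cons_succ {α : Type} (x : α) (xs : List α) (n : Nat) (d : α) :
    PySem.List.pyGetD (x :: xs) ((n : Int) + 1) d = PySem.List.pyGetD xs (n : Int) d := by
  have h : ((n : Int) + 1) = ((n + 1 : Nat) : Int) := by push_cast; ring
  rw [h, PySem.List.pyGetD_natCast, PySem.List.pyGetD_natCast, List.getD_cons_succ]

theorem pySetD_cons_succ {α : Type} (x : α) (xs : List α) (n : Nat) (v : α) :
    PySem.List.pySetD (x :: xs) ((n : Int) + 1) v = x :: PySem.List.pySetD xs (n : Int) v := by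
  simp only [PySem.List.pySetD, PySem.List.pySet?, PySem.List.pyIdx?, List.length_cons,
    Nat.cast_add, Nat.cast_one]
  split_ifs
  all_goals simp only [Option.map_some, Option.map_none, Option.getD_some, Option.getD_none]
  all_goals
    first
      | rfl
      | (exfalso; omega)
      | (rw [show ((n : Int) + 1).toNat = n + 1 from by omega,
             show ((n : Int)).toNat = n from by omega, List.set_cons_succ])

theorem pySetD_cons_zero {α : Type} (x : α) (xs : List α) (v : α) :
    PySem.List.pySetD (x :: xs) 0 v = v :: xs := by
  simp [PySem.List.pySetD, PySem.List.pySet?, PySem.List.pyIdx?]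

-- B's body at a position inside the current (last) layer: update the head accumulator.
theorem Bstep_zero {s p : Int} (hs : 0 < s) (h0 : 0 ≤ p) (hps : p < s) (c : Char)
    (d : PySem.Dict String Int) (L : List (PySem.Dict String Int)) :
    Bstep s (d :: L) (p, c) = stepD d c :: L := by
  have hli : PySem.Int.floordiv p s = 0 := by
    rw [PySem.Int.floordiv_eq_iff_of_pos hs]; constructor <;> nlinarith
  simp only [Bstep, hli, List.length_cons, Nat.cast_add, Nat.cast_one]
  split_ifs with hif
  · exfalso; omega
  · simp only [PySem.List.pyGetD_zero_cons, pySetD_cons_zero, stepD]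

-- B's body at the very first position: append a fresh layer and count into it.
theorem Bstep_first {s : Int} (hs : 0 < s) (c : Char) :
    Bstep s [] (0, c) = [stepD PySem.Dict.empty c] := by
  have hli : PySem.Int.floordiv 0 s = 0 := by
    rw [PySem.Int.floordiv_eq_iff_of_pos hs]; constructor <;> nlinarith
  simp [Bstep, hli, pySetD_cons_zero, PySem.List.pyGetD_zero_cons, stepD]

-- B's body at a position at least s: it leaves the head layer alone and acts shifted on the tail.
theorem Bstep_shift {s p : Int} (hs : 0 < s) (hp : s ≤ p) (c : Char)
    (c0 : PySem.Dict String Int) (L : List (PySem.Dict String Int)) :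
    Bstep s (c0 :: L) (p, c) = c0 :: Bstep s L (p - s, c) := by
  have hm : 0 ≤ PySem.Int.floordiv (p - s) s :=
    (PySem.Int.le_floordiv_iff_mul_le hs).2 (by nlinarith)
  obtain ⟨k, hk⟩ : ∃ k : Nat, PySem.Int.floordiv (p - s) s = (k : Int) :=
    ⟨_, (Int.toNat_of_nonneg hm).symm⟩
  have hli : PySem.Int.floordiv p s = (k : Int) + 1 := by
    have h := floordiv_add_right hs (p - s)
    rw [sub_add_cancel, hk] at h
    exact h
  simp only [Bstep, hli, hk, List.length_cons, Nat.cast_add, Nat.cast_one]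
  by_cases hEq : ((k : Int) + 1) = ((L.length : Int) + 1)
  · rw [if_pos hEq, if_pos (by omega), List.cons_append, pyGetD_cons_succ, pySetD_cons_succ]
  · rw [if_neg hEq, if_neg (by omega), pyGetD_cons_succ, pySetD_cons_succ]

theorem Bfold_nil (s p : Int) (L : List (PySem.Dict String Int)) : Bfold s [] p L = L := by
  simp [Bfold, PySem.List.enumerate]

theorem Bfold_cons (s p : Int) (c : Char) (t : List Char) (L : List (PySem.Dict String Int)) :
    Bfold s (c :: t) p L = Bfold s t (p + 1) (Bstep s L (p, c)) := by
  simp [Bfold, PySem.List.enumerate_cons]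

theorem Bfold_append (s p : Int) (xs ys : List Char) (L : List (PySem.Dict String Int)) :
    Bfold s (xs ++ ys) p L = Bfold s ys (p + xs.length) (Bfold s xs p L) := by
  simp [Bfold, PySem.List.enumerate_append, List.foldl_append]

-- A whole run of positions falling inside the current layer folds stepD over the head.
theorem Bchunk {s : Int} (hs : 0 < s) :
    ∀ (cs : List Char) (p : Int), 0 ≤ p → p + (cs.length : Int) ≤ s →
      ∀ (d : PySem.Dict String Int) (L : List (PySem.Dict String Int)),
        Bfold s cs p (d :: L) = cs.foldl stepD d :: L := by
  intro cs
  induction cs with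
  | nil => intro p _ _ d L; simp [Bfold_nil]
  | cons c t ih =>
    intro p h0 hle d L
    have hlen : p + (t.length : Int) + 1 ≤ s := by
      simpa [add_assoc] using hle
    rw [Bfold_cons, Bstep_zero hs h0 (by omega), ih (p + 1) (by omega) (by omega), List.foldl_cons]

-- Positions at least s never touch the head layer: the whole run commutes with consing it.
theorem Bshift {s : Int} (hs : 0 < s) :
    ∀ (cs : List Char) (p : Int), s ≤ p →
      ∀ (c0 : PySem.Dict String Int) (L : List (PySem.Dict String Int)),
        Bfold s cs p (c0 :: L) = c0 :: Bfold s cs (p - s) L := by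
  intro cs
  induction cs with
  | nil => intro p _ c0 L; simp [Bfold_nil]
  | cons c t ih =>
    intro p hp c0 L
    rw [Bfold_cons, Bstep_shift hs hp, ih (p + 1) (by omega), Bfold_cons]
    have h : p + 1 - s = p - s + 1 := by ring
    rw [h]

-- One chunk of B's flat pass peels off the first layer.
theorem Bsplit {s : Int} (hs : 0 < s) (cs : List Char) (h : cs ≠ []) :
    Bfold s cs 0 [] = ((cs.take s.toNat).foldl stepD PySem.Dict.empty) :: Bfold s (cs.drop s.toNat) 0 [] := by
  rcases cs with _ | ⟨c, t⟩
  · exact absurd rfl h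
  have hk : 1 ≤ s.toNat := by omega
  have htake : List.take s.toNat (c :: t) = c :: List.take (s.toNat - 1) t := by
    conv_lhs => rw [show s.toNat = (s.toNat - 1) + 1 from by omega]
    rw [List.take_succ_cons]
  have hdrop : List.drop s.toNat (c :: t) = List.drop (s.toNat - 1) t := by
    conv_lhs => rw [show s.toNat = (s.toNat - 1) + 1 from by omega]
    rw [List.drop_succ_cons]
  rw [Bfold_cons, Bstep_first hs, htake, hdrop]
  conv_lhs => rw [show t = List.take (s.toNat - 1) t ++ List.drop (s.toNat - 1) t from
    (List.take_append_drop _ t).symm]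
  rw [Bfold_append]
  simp only [zero_add]
  have hlen1 : (List.take (s.toNat - 1) t).length ≤ s.toNat - 1 := by
    simp [List.length_take]
  rw [Bchunk hs _ 1 (by omega) (by omega)]
  by_cases ht2 : List.drop (s.toNat - 1) t = []
  · rw [ht2, Bfold_nil, Bfold_nil, List.foldl_cons]
  · have hlen2 : (List.take (s.toNat - 1) t).length = s.toNat - 1 := by
      have : ¬ t.length ≤ s.toNat - 1 := fun hle => ht2 (List.drop_eq_nil_of_le hle)
      simp [List.length_take]; omega
    rw [hlen2, show (1 : Int) + ((s.toNat - 1 : Nat) : Int) = s from by omega,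
        Bshift hs _ s le_rfl, sub_self, List.foldl_cons]

theorem neg_step_range (n s : Int) (hn : 0 ≤ n) (hs : s < 0) : PySem.List.pyRange 0 n s = [] := by
  simp only [PySem.List.pyRange]
  rw [if_neg (by omega)]
  have h1 : ¬ (0 : Int) < s := by omega
  have h2 : ¬ n < 0 := by omega
  simp [h1, h2]

-- One chunk, shifted one layer to the right, is the corresponding chunk of the dropped list.
theorem slice_chunk_shift (cs : List Char) {s : Int} (hs : 0 < s) (a : Int) (ha : 0 ≤ a) :
    PySem.List.slice cs (some (a + s)) (some (a + s + s)) =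
    PySem.List.slice (cs.drop s.toNat) (some a) (some (a + s)) := by
  rw [PySem.List.slice_toNat _ (by omega) (by omega), PySem.List.slice_toNat _ ha (by omega),
      List.drop_drop]
  have e1 : (a + s + s).toNat - (a + s).toNat = (a + s).toNat - a.toNat := by omega
  have e2 : (a + s).toNat = s.toNat + a.toNat := by omega
  rw [e1, e2]

-- One chunk of A's chunked pass peels off the first layer.
theorem Asplit {s : Int} (hs : 0 < s) (cs : List Char) (h : cs ≠ []) :
    Acore s cs = ((cs.take s.toNat).foldl stepD PySem.Dict.empty) :: Acore s (cs.drop s.toNat) := by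
  have hn0 : 0 < cs.length := List.length_pos_of_ne_nil h
  have hn : (0 : Int) < (cs.length : Int) := by omega
  have hslice0 : PySem.List.slice cs (some 0) (some s) = cs.take s.toNat := by
    rw [PySem.List.slice_toNat _ le_rfl (by omega)]
    simp
  rw [Acore_eq_map, Acore_eq_map, PySem.List.pyRange_of_pos _ _ hs, PySem.List.pyRange_of_pos _ _ hs]
  by_cases hbig : s.toNat < cs.length
  · have hd : ((cs.drop s.toNat).length : Int) = (cs.length : Int) - s := by
      simp only [List.length_drop]; omega
    have hm' : 1 ≤ (((cs.drop s.toNat).length : Int) - 0 + s - 1) / s := by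
      rw [← PySem.Int.floordiv_eq_ediv_of_pos hs]
      exact (PySem.Int.le_floordiv_iff_mul_le hs).2 (by omega)
    have hmm : ((cs.length : Int) - 0 + s - 1) / s
        = (((cs.drop s.toNat).length : Int) - 0 + s - 1) / s + 1 := by
      rw [← PySem.Int.floordiv_eq_ediv_of_pos hs, ← PySem.Int.floordiv_eq_ediv_of_pos hs]
      rw [show (cs.length : Int) - 0 + s - 1
            = (((cs.drop s.toNat).length : Int) - 0 + s - 1) + s from by omega]
      exact floordiv_add_right hs _
    rw [if_pos hn, if_pos (by omega), hmm,
        show ((((cs.drop s.toNat).length : Int) - 0 + s - 1) / s + 1).toNat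
          = ((((cs.drop s.toNat).length : Int) - 0 + s - 1) / s).toNat + 1 from by omega,
        List.range_succ_eq_map]
    simp only [List.map_cons, List.map_map, Nat.cast_zero, mul_zero, zero_add]
    rw [List.cons_eq_cons]
    constructor
    · rw [hslice0]
    · apply List.map_congr_left
      intro k _
      simp only [Function.comp_apply]
      rw [show s * ((Nat.succ k : Nat) : Int) = s * (k : Int) + s from by push_cast; ring]
      rw [slice_chunk_shift cs hs (s * (k : Int)) (by positivity)]
  · have hdropnil : cs.drop s.toNat = [] := List.drop_eq_nil_of_le (by omega)
    have hone : ((cs.length : Int) - 0 + s - 1) / s = 1 := by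
      rw [← PySem.Int.floordiv_eq_ediv_of_pos hs, PySem.Int.floordiv_eq_iff_of_pos hs]
      have hle : (cs.length : Int) ≤ s := by omega
      constructor <;> nlinarith
    rw [hdropnil, if_pos hn, if_neg (by simp), hone]
    simp only [Int.toNat_one, List.range_one, List.range_zero, List.map_cons, List.map_nil,
      Nat.cast_zero, mul_zero, zero_add]
    rw [hslice0]

theorem main_eq (s : Int) (hs : 0 < s) : ∀ (cs : List Char), Acore s cs = Bfold s cs 0 [] := by
  intro cs
  generalize hn : cs.length = n
  induction n using Nat.strong_induction_on generalizing cs with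
  | _ n ih =>
    rcases cs with _ | ⟨c, t⟩
    · rw [Bfold_nil]
      simp [Acore, PySem.List.pyRange]
    · rw [Asplit hs _ (by simp), Bsplit hs _ (by simp)]
      have hlen : ((c :: t).drop s.toNat).length < n := by
        subst hn
        have : 0 < s.toNat := by omega
        simp only [List.length_drop, List.length_cons]
        omega
      rw [ih _ hlen _ rfl]

-- ===== VERDICT (by name: the statement is the Claim_ definition above) =====
theorem construct_layers_spec : Claim_equal_construct_layers := by
  intro inp width height _ hpre
  unfold Spec_construct_layers
  rw [construct_layers_eq_Acore, construct_layers_alt_eq_Bfold]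
  by_cases hle : width * height ≤ 0
  · have hneg : width * height < 0 := lt_of_le_of_ne hle hpre
    rw [if_pos hle, Acore, neg_step_range _ _ (by positivity) hneg]
    simp
  · rw [if_neg hle, main_eq _ (by omega)]
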